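-- pv_equiv track=rewrite | github.com/Disconnected-7052/WeeWee | Week 6/nyoba.py | Finilazing
-- ===== SOURCE A (Python) =====
-- def Finilazing(Final_List, Sum):
--     Display_List = []
--     for A in range(len(Final_List)):
--         Key = False
--         for B in range(len(Display_List)):
--             if Final_List[A][0] == Display_List[B][0]:
--                 Display_List[B][1] += 1
--                 Display_List[B][2] += Final_List[A][1]
--                 Key = True
--         if Key == False:
--             Display_List.append([Final_List[A][0], 1, Final_List[A][1]])
--     Print_This = ""
--     for A in range(len(Display_List)):
--         Text = str(Display_List[A][0]) + " * " + str(Display_List[A][1]) + " = " + str(Display_List[A][2]) + "\n"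
--         Print_This += Text
--     Print_This += "Total Sum = " + str(Sum)
--     return Print_This
-- ===== SOURCE B (Python) =====
-- def Finilazing(Final_List, Sum):
--     pieces = []
--     rows = Final_List
--     while rows:
--         key = rows[0][0]
--         count = 0
--         total = 0
--         rest = []
--         for r in rows:
--             if r[0] == key:
--                 count += 1
--                 total += r[1]
--             else:
--                 rest.append(r)
--         pieces.append(str(key) + " * " + str(count) + " = " + str(total) + "\n")
--         rows = rest
--     return "".join(pieces) + "Total Sum = " + str(Sum)
-- ===== Notes on version B (the rewrite author's own statement) =====
-- stated objective: alternative
-- what changed: Replaced A's per-row rescan of a growing display list with repeated partitioning: each outer pass takes the leading key, counts/sums and removes all rows with that key in one sweep, then recurses on the remainder.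
import Mathlib
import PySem

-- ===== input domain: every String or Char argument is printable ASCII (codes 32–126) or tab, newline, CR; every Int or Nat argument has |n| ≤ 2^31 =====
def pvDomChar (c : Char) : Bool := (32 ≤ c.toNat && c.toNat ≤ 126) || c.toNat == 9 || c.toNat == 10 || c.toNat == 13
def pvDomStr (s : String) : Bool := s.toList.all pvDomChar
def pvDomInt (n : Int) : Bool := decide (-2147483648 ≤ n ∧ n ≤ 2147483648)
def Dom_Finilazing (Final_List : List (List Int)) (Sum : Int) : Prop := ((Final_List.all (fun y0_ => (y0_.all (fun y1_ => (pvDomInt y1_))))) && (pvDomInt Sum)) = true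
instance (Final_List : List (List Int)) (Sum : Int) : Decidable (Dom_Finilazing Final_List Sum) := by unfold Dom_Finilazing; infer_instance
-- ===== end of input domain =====

-- B replaces A's per-row rescan of a growing display list with repeated partitioning: each pass strips all rows sharing the leading key, emits one line, and recurses on the remainder (alternative algorithm, same cost).


-- ===== PORT A =====
-- inner 'for B in range(len(Display_List))' loop: walks the display list, bumping count and sum
-- of every entry whose head equals the row's key (in-place index sets ported with pySetD), and
-- reports whether any entry matched (the 'Key' flag).
def finInner (k v : Int) : List (List Int) → List (List Int) × Bool
  | [] => ([], false)
  | e :: rest =>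
    let hit := PySem.List.pyGetD e 0 0 = k
    let e' := if hit then
        PySem.List.pySetD (PySem.List.pySetD e 1 (PySem.List.pyGetD e 1 0 + 1)) 2
          (PySem.List.pyGetD e 2 0 + v)
      else e
    let (rest', kb) := finInner k v rest
    (e' :: rest', hit || kb)

def finStepA (dl : List (List Int)) (row : List Int) : List (List Int) :=
  let k := PySem.List.pyGetD row 0 0
  let v := PySem.List.pyGetD row 1 0
  let (dl', key) := finInner k v dl
  if key = false then dl' ++ [[k, 1, v]] else dl'

def Finilazing (Final_List : List (List Int)) (Sum : Int) : String :=
  let dl := Final_List.foldl finStepA []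
  let printThis := dl.foldl (fun acc e =>
    acc ++ PySem.Int.toStr (PySem.List.pyGetD e 0 0) ++ " * "
        ++ PySem.Int.toStr (PySem.List.pyGetD e 1 0) ++ " = "
        ++ PySem.Int.toStr (PySem.List.pyGetD e 2 0) ++ "\n") ""
  printThis ++ "Total Sum = " ++ PySem.Int.toStr Sum

-- ===== PORT B =====
-- the inner 'for r in rows' loop of Source B: accumulates (count, total, rest)
def finScan (k : Int) (rows : List (List Int)) : Int × Int × List (List Int) :=
  rows.foldl (fun st r =>
    if PySem.List.pyGetD r 0 0 == k then (st.1 + 1, st.2.1 + PySem.List.pyGetD r 1 0, st.2.2)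
    else (st.1, st.2.1, st.2.2 ++ [r])) (0, 0, [])

-- characterisation of the scan, stated here because finGroupB's termination cites it
theorem finScan_go (k : Int) (l : List (List Int)) :
    ∀ c s rest, l.foldl (fun st r =>
      if PySem.List.pyGetD r 0 0 == k then (st.1 + 1, st.2.1 + PySem.List.pyGetD r 1 0, st.2.2)
      else (st.1, st.2.1, st.2.2 ++ [r])) (c, s, rest) =
      (c + ((l.filter (fun x => PySem.List.pyGetD x 0 0 == k)).length : Int),
       s + ((l.filter (fun x => PySem.List.pyGetD x 0 0 == k)).map (fun x => PySem.List.pyGetD x 1 0)).sum,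
       rest ++ l.filter (fun x => !(PySem.List.pyGetD x 0 0 == k))) := by
  induction l with
  | nil => intro c s rest; simp
  | cons r l ih =>
    intro c s rest
    simp only [List.foldl_cons]
    by_cases h : PySem.List.pyGetD r 0 0 = k
    · rw [if_pos (by simp [h]), ih]
      simp [h, Prod.ext_iff]
      constructor <;> ring
    · rw [if_neg (by simp [h]), ih]
      simp [h]

theorem finScan_spec (k : Int) (l : List (List Int)) :
    finScan k l =
      (((l.filter (fun x => PySem.List.pyGetD x 0 0 == k)).length : Int),
       ((l.filter (fun x => PySem.List.pyGetD x 0 0 == k)).map (fun x => PySem.List.pyGetD x 1 0)).sum,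
       l.filter (fun x => !(PySem.List.pyGetD x 0 0 == k))) := by
  unfold finScan
  rw [finScan_go]
  simp

-- the outer 'while rows' loop of Source B: one formatted line per pass, recurse on the rest
def finGroupB : List (List Int) → List String
  | [] => []
  | r :: rs =>
    (PySem.Int.toStr (PySem.List.pyGetD r 0 0) ++ " * "
      ++ PySem.Int.toStr (finScan (PySem.List.pyGetD r 0 0) (r :: rs)).1 ++ " = "
      ++ PySem.Int.toStr (finScan (PySem.List.pyGetD r 0 0) (r :: rs)).2.1 ++ "\n")
    :: finGroupB (finScan (PySem.List.pyGetD r 0 0) (r :: rs)).2.2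
termination_by l => l.length
decreasing_by
  simp only [finScan_spec, List.filter_cons, beq_self_eq_true, Bool.not_true, List.length_cons]
  exact Nat.lt_succ_of_le (List.length_filter_le _ _)

def Finilazing_alt (Final_List : List (List Int)) (Sum : Int) : String :=
  PySem.Str.join "" (finGroupB Final_List) ++ "Total Sum = " ++ PySem.Int.toStr Sum

-- ===== PRECONDITION & SPEC =====
-- Pre_ excludes exactly the inputs where A raises IndexError (a row shorter than 2, so row[0] or
-- row[1] fails); B raises there too.
def Pre_Finilazing (Final_List : List (List Int)) (Sum : Int) : Prop :=
  ∀ row ∈ Final_List, 2 ≤ row.length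
instance (Final_List : List (List Int)) (Sum : Int) : Decidable (Pre_Finilazing Final_List Sum) := by unfold Pre_Finilazing; infer_instance
def pvWitness_Finilazing : List (List Int) × Int := ([[1, 2], [1, 3], [2, 5]], 10)

def Spec_Finilazing (Final_List : List (List Int)) (Sum : Int) (out : String) : Prop := out = Finilazing_alt Final_List Sum
instance (Final_List : List (List Int)) (Sum : Int) (out : String) : Decidable (Spec_Finilazing Final_List Sum out) := by unfold Spec_Finilazing; infer_instance

-- ===== CLAIM (what is proved, stated in full; the proofs are below) =====
def Claim_equal_Finilazing : Prop := ∀ (Final_List : List (List Int)) (Sum : Int), Dom_Finilazing Final_List Sum → Pre_Finilazing Final_List Sum → Spec_Finilazing Final_List Sum (Finilazing Final_List Sum)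

-- ===== LEMMAS AND PROOFS =====
-- Abstraction: A's display entries are triples [k, c, s].
def finEmbed (t : Int × Int × Int) : List Int := [t.1, t.2.1, t.2.2]

def keyOf (r : List Int) : Int := PySem.List.pyGetD r 0 0
def valOf (r : List Int) : Int := PySem.List.pyGetD r 1 0
def cntK (k : Int) (l : List (List Int)) : Int := ((l.filter (fun x => keyOf x == k)).length : Int)
def smK (k : Int) (l : List (List Int)) : Int := ((l.filter (fun x => keyOf x == k)).map valOf).sum

-- the grouping both programs compute: first-occurrence keys with their count and value-sum
def displSpec : List (List Int) → List (Int × Int × Int)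
  | [] => []
  | r :: rs =>
    (keyOf r, 1 + cntK (keyOf r) rs, valOf r + smK (keyOf r) rs)
      :: displSpec (rs.filter (fun x => !(keyOf x == keyOf r)))
termination_by l => l.length
decreasing_by
  simp only [List.length_unattach]
  exact Nat.lt_succ_of_le (le_trans (List.length_filter_le _ _) (by simp))

def mergeSpec (ts : List (Int × Int × Int)) (l : List (List Int)) : List (Int × Int × Int) :=
  ts.map (fun t => (t.1, t.2.1 + cntK t.1 l, t.2.2 + smK t.1 l))
  ++ displSpec (l.filter (fun x => !((ts.map (·.1)).contains (keyOf x))))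

theorem displSpec_cons (r : List Int) (rs : List (List Int)) :
    displSpec (r :: rs) =
      (keyOf r, 1 + cntK (keyOf r) rs, valOf r + smK (keyOf r) rs)
        :: displSpec (rs.filter (fun x => !(keyOf x == keyOf r))) := by
  rw [displSpec]

theorem finInner_spec (k v : Int) (ts : List (Int × Int × Int)) :
    finInner k v (ts.map finEmbed) =
      ((ts.map (fun t => if t.1 = k then (k, t.2.1 + 1, t.2.2 + v) else t)).map finEmbed,
       ts.any (fun t => t.1 = k)) := by
  induction ts with
  | nil => rfl
  | cons t rest ih =>
    obtain ⟨a, b, c⟩ := t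
    simp [finInner, finEmbed, ih, PySem.List.pyGetD, PySem.List.pyGet?, PySem.List.pyIdx?,
      PySem.List.pySetD, PySem.List.pySet?]
    by_cases h : a = k <;> simp [h]

theorem fin_filter_filter_of_imp {a : Type} (p q : a → Bool) (l : List a)
    (h : ∀ x ∈ l, q x = true → p x = true) : (l.filter p).filter q = l.filter q := by
  induction l with
  | nil => rfl
  | cons x l ih =>
    have ih' := ih (fun y hy => h y (List.mem_cons_of_mem _ hy))
    cases hq : q x
    · cases hp : p x <;> simp [hp, hq, ih']
    · have hp := h x (by simp) hq
      simp [hp, hq, ih']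

theorem fin_cntK_filter (k : Int) (p : List Int → Bool) (l : List (List Int))
    (h : ∀ x ∈ l, (keyOf x == k) = true → p x = true) :
    cntK k (l.filter p) = cntK k l := by
  unfold cntK
  rw [fin_filter_filter_of_imp p _ l h]

theorem fin_smK_filter (k : Int) (p : List Int → Bool) (l : List (List Int))
    (h : ∀ x ∈ l, (keyOf x == k) = true → p x = true) :
    smK k (l.filter p) = smK k l := by
  unfold smK
  rw [fin_filter_filter_of_imp p _ l h]

theorem fin_cntK_cons (k : Int) (r : List Int) (l : List (List Int)) :
    cntK k (r :: l) = (if keyOf r = k then 1 else 0) + cntK k l := by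
  unfold cntK
  by_cases h : keyOf r = k <;> simp [h] <;> push_cast <;> ring

theorem fin_smK_cons (k : Int) (r : List Int) (l : List (List Int)) :
    smK k (r :: l) = (if keyOf r = k then valOf r else 0) + smK k l := by
  unfold smK
  by_cases h : keyOf r = k <;> simp [h]

theorem foldA_merge (FL : List (List Int)) :
    ∀ (ts : List (Int × Int × Int)),
      FL.foldl finStepA (ts.map finEmbed) = (mergeSpec ts FL).map finEmbed := by
  induction FL with
  | nil =>
    intro ts
    simp [mergeSpec, cntK, smK, displSpec]
  | cons r FL ih =>
    intro ts
    simp only [List.foldl_cons]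
    have hstep : finStepA (ts.map finEmbed) r =
        (if (ts.any (fun t => t.1 = PySem.List.pyGetD r 0 0)) = false
          then ((ts.map (fun t => if t.1 = PySem.List.pyGetD r 0 0 then
              (PySem.List.pyGetD r 0 0, t.2.1 + 1, t.2.2 + PySem.List.pyGetD r 1 0) else t)).map
                finEmbed)
            ++ [[PySem.List.pyGetD r 0 0, 1, PySem.List.pyGetD r 1 0]]
          else (ts.map (fun t => if t.1 = PySem.List.pyGetD r 0 0 then
              (PySem.List.pyGetD r 0 0, t.2.1 + 1, t.2.2 + PySem.List.pyGetD r 1 0) else t)).map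
                finEmbed) := by
      simp only [finStepA, finInner_spec]
    rw [hstep]
    by_cases hmem : PySem.List.pyGetD r 0 0 ∈ ts.map (·.1)
    · have hany : ts.any (fun t => t.1 = PySem.List.pyGetD r 0 0) = true := by
        rcases List.mem_map.mp hmem with ⟨t, ht, hk⟩
        exact List.any_eq_true.mpr ⟨t, ht, by simp [hk]⟩
      rw [if_neg (by simp [hany])]
      rw [ih]
      congr 1
      unfold mergeSpec
      have hkeys : (ts.map (fun t => if t.1 = PySem.List.pyGetD r 0 0 then
          (PySem.List.pyGetD r 0 0, t.2.1 + 1, t.2.2 + PySem.List.pyGetD r 1 0) else t)).map (·.1)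
          = ts.map (·.1) := by
        rw [List.map_map]
        apply List.map_congr_left
        intro t ht
        by_cases htk : t.1 = PySem.List.pyGetD r 0 0 <;> simp [Function.comp, htk]
      congr 1
      · rw [List.map_map]
        apply List.map_congr_left
        intro t ht
        by_cases htk : t.1 = PySem.List.pyGetD r 0 0
        · simp only [Function.comp, htk, fin_cntK_cons, fin_smK_cons, keyOf, valOf, if_pos rfl]
          refine Prod.ext rfl (Prod.ext ?_ ?_) <;> simp <;> ring
        · simp only [Function.comp, if_neg htk, fin_cntK_cons, fin_smK_cons, keyOf, valOf]
          rw [if_neg (fun hc => htk hc.symm), if_neg (fun hc => htk hc.symm)]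
          simp
      · rw [hkeys]
        congr 1
        have hc : ((ts.map (·.1)).contains (keyOf r)) = true :=
          List.contains_iff_mem.mpr hmem
        simp only [List.filter_cons, hc, Bool.not_true, Bool.false_eq_true, if_false]
    · have hne : ∀ t ∈ ts, ¬ t.1 = PySem.List.pyGetD r 0 0 := by
        intro t ht hc
        exact hmem (hc ▸ List.mem_map_of_mem ht)
      have hany : ts.any (fun t => t.1 = PySem.List.pyGetD r 0 0) = false := by
        refine List.any_eq_false.mpr ?_
        intro t ht
        simp [hne t ht]
      rw [if_pos (by simp [hany])]
      have hid : ts.map (fun t => if t.1 = PySem.List.pyGetD r 0 0 then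
          (PySem.List.pyGetD r 0 0, t.2.1 + 1, t.2.2 + PySem.List.pyGetD r 1 0) else t) = ts := by
        refine (List.map_congr_left ?_).trans ts.map_id
        intro t ht
        simp [hne t ht]
      rw [hid, show (ts.map finEmbed) ++ [[PySem.List.pyGetD r 0 0, 1, PySem.List.pyGetD r 1 0]]
          = (ts ++ [(PySem.List.pyGetD r 0 0, 1, PySem.List.pyGetD r 1 0)]).map finEmbed by
        simp [finEmbed]]
      rw [ih]
      congr 1
      unfold mergeSpec
      have hcf : ((ts.map (·.1)).contains (keyOf r)) = false :=
        Bool.eq_false_iff.mpr (fun hc => hmem (List.contains_iff_mem.mp hc))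
      have hkeep : ∀ x : List Int, (keyOf x == keyOf r) = true →
          (!(ts.map (·.1)).contains (keyOf x)) = true := by
        intro x hx
        have hxy : keyOf x = keyOf r := by simpa using hx
        rw [hxy, hcf]
        rfl
      rw [List.filter_cons]
      simp only [hcf, Bool.not_false, if_true]
      rw [displSpec_cons]
      have hcnt := fin_cntK_filter (keyOf r) (fun x => !(ts.map (·.1)).contains (keyOf x)) FL
        (fun x _ hx => hkeep x hx)
      have hsm := fin_smK_filter (keyOf r) (fun x => !(ts.map (·.1)).contains (keyOf x)) FL
        (fun x _ hx => hkeep x hx)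
      rw [List.map_append, List.append_assoc]
      congr 1
      · apply List.map_congr_left
        intro t ht
        rw [fin_cntK_cons, fin_smK_cons, if_neg, if_neg]
        · simp
        · exact fun hc => hne t ht hc.symm
        · exact fun hc => hne t ht hc.symm
      · simp only [List.map_cons, List.map_nil, List.cons_append, List.nil_append]
        congr 1
        · simp only [keyOf, valOf] at hcnt hsm ⊢
          rw [hcnt, hsm]
        · congr 1
          rw [List.filter_filter]
          apply List.filter_congr
          intro x hx
          simp only [List.map_append, List.map_cons, List.map_nil, List.contains_append,
            List.contains_cons, List.contains_nil, Bool.or_false, Bool.not_or, keyOf]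
          by_cases h2 : PySem.List.pyGetD x 0 0 = PySem.List.pyGetD r 0 0
          · simp [h2]
          · have h2' : ¬ PySem.List.pyGetD r 0 0 = PySem.List.pyGetD x 0 0 :=
              fun hc => h2 hc.symm
            simp [h2', Bool.and_comm]

theorem finGroupB_eq_aux : ∀ (n : Nat) (l : List (List Int)), l.length ≤ n →
    finGroupB l = (displSpec l).map (fun t =>
      PySem.Int.toStr t.1 ++ " * " ++ PySem.Int.toStr t.2.1 ++ " = "
        ++ PySem.Int.toStr t.2.2 ++ "\n") := by
  intro n
  induction n with
  | zero =>
    intro l hl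
    have : l = [] := List.length_eq_zero_iff.mp (Nat.le_zero.mp hl)
    subst this
    simp [finGroupB, displSpec]
  | succ n ih =>
    intro l hl
    match l with
    | [] => simp [finGroupB, displSpec]
    | r :: rs =>
      rw [finGroupB, displSpec]
      have hrest : (finScan (PySem.List.pyGetD r 0 0) (r :: rs)).2.2
          = rs.filter (fun x => !(keyOf x == keyOf r)) := by
        rw [finScan_spec]
        simp [keyOf]
      have hcnt : (finScan (PySem.List.pyGetD r 0 0) (r :: rs)).1
          = 1 + cntK (keyOf r) rs := by
        rw [finScan_spec]
        simp [cntK, keyOf]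
        push_cast
        ring
      have hsm : (finScan (PySem.List.pyGetD r 0 0) (r :: rs)).2.1
          = valOf r + smK (keyOf r) rs := by
        rw [finScan_spec]
        simp [smK, keyOf]
        rfl
      rw [hrest, hcnt, hsm, List.map_cons]
      congr 1
      exact ih _ (le_trans (List.length_filter_le _ _) (Nat.le_of_succ_le_succ hl))

theorem finGroupB_eq (l : List (List Int)) :
    finGroupB l = (displSpec l).map (fun t =>
      PySem.Int.toStr t.1 ++ " * " ++ PySem.Int.toStr t.2.1 ++ " = "
        ++ PySem.Int.toStr t.2.2 ++ "\n") :=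
  finGroupB_eq_aux l.length l le_rfl

theorem fin_flatten_intersperse_nil (l : List (List Char)) :
    (List.intersperse ([] : List Char) l).flatten = l.flatten := by
  induction l with
  | nil => rfl
  | cons x l ih =>
    cases l with
    | nil => rfl
    | cons y t => simpa [List.intersperse_cons₂] using ih

theorem fin_join_cons (x : String) (xs : List String) :
    PySem.Str.join "" (x :: xs) = x ++ PySem.Str.join "" xs := by
  simp [PySem.Str.join, PySem.Chars.join, List.intercalate, fin_flatten_intersperse_nil,
    String.ofList_append, String.ofList_toList]

theorem fin_format (ts : List (Int × Int × Int)) (init : String) :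
    (ts.map finEmbed).foldl (fun acc e =>
      acc ++ PySem.Int.toStr (PySem.List.pyGetD e 0 0) ++ " * "
          ++ PySem.Int.toStr (PySem.List.pyGetD e 1 0) ++ " = "
          ++ PySem.Int.toStr (PySem.List.pyGetD e 2 0) ++ "\n") init =
    init ++ PySem.Str.join "" (ts.map (fun t =>
      PySem.Int.toStr t.1 ++ " * " ++ PySem.Int.toStr t.2.1 ++ " = "
        ++ PySem.Int.toStr t.2.2 ++ "\n")) := by
  induction ts generalizing init with
  | nil => simp [PySem.Str.join, PySem.Chars.join, List.intercalate]
  | cons t rest ih =>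
    obtain ⟨a, b, c⟩ := t
    simp only [List.map_cons, List.foldl_cons, ih, fin_join_cons]
    simp [finEmbed, PySem.List.pyGetD, PySem.List.pyGet?, PySem.List.pyIdx?,
      String.append_assoc]

-- ===== VERDICT (by name: the statement is the Claim_ definition above) =====
theorem Finilazing_spec : Claim_equal_Finilazing := by
  intro FL Sum _ _
  unfold Spec_Finilazing Finilazing Finilazing_alt
  have hA := foldA_merge FL []
  simp only [List.map_nil] at hA
  have hm : mergeSpec [] FL = displSpec FL := by
    simp [mergeSpec]
  simp only [hA, hm, fin_format, finGroupB_eq]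
  simp
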